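-- pv_equiv track=rewrite | github.com/lascivaroma/corpus-builder | app/bp.py | build
-- ===== SOURCE A (Python) =====
-- _keys = ("ref", "lemma", "pos", "msd",)
--
-- def build(hits, keys=_keys, ana="", remove_before_dot=False, remove_after_dot=False):
--     refs, ref_type, data = [], [], []
--     for token in zip(*hits.values()):
--         token = dict(zip(hits.keys(), token))
--         refs.append(token["ref"])
--         ref_type.append(token["in"])
--         data.append(
--             "<w " + ana + " ".join(
--                 ["{}=\"{}\"".format(k, token[k]) for k in keys]
--             ) + ">" + token["word"] + "</w>"
--         )
--         if token["lemma"] in {".", "?", "!"}: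
--             if remove_before_dot:
--                 refs, ref_type, data = [], [], []
--             elif remove_after_dot:
--                 break
--     return refs, ref_type, data
-- ===== SOURCE B (Python) =====
-- _keys = ("ref", "lemma", "pos", "msd",)
--
-- def build(hits, keys=_keys, ana="", remove_before_dot=False, remove_after_dot=False):
--     tokens = [dict(zip(hits.keys(), vals)) for vals in zip(*hits.values())]
--     punct = [i for i, t in enumerate(tokens) if t["lemma"] in {".", "?", "!"}]
--     if remove_before_dot:
--         sel = tokens[punct[-1] + 1:] if punct else tokens
--     elif remove_after_dot:
--         sel = tokens[:punct[0] + 1] if punct else tokens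
--     else:
--         sel = tokens
--     refs = [t["ref"] for t in sel]
--     ref_type = [t["in"] for t in sel]
--     data = [
--         "<w " + ana + " ".join('{}="{}"'.format(k, t[k]) for k in keys) + ">" + t["word"] + "</w>"
--         for t in sel
--     ]
--     return refs, ref_type, data
-- ===== Notes on version B (the rewrite author's own statement) =====
-- stated objective: alternative
-- what changed: Replaced A's single stateful loop (which clears the accumulators or breaks at sentence punctuation while building) by a boundary-finding pass over punctuation indices, a slice of the token list, and three plain maps over the slice.
import Mathlib
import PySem

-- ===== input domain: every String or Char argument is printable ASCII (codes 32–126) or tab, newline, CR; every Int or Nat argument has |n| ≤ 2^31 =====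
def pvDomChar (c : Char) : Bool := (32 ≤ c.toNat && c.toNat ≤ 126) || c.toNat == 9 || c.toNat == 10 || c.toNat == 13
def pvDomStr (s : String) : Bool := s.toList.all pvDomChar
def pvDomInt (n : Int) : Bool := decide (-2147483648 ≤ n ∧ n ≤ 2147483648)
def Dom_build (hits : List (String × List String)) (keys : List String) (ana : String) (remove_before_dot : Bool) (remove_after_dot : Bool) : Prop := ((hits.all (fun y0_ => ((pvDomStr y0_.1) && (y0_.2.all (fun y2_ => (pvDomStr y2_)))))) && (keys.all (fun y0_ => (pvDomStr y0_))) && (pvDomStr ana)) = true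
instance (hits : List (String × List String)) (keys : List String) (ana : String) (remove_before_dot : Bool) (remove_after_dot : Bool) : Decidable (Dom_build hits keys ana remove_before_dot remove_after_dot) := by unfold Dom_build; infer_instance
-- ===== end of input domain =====

-- B replaces A's single stateful loop (clear / break at sentence punctuation) by a punctuation-index
-- pass followed by a slice and three maps; equivalence of the return values is proved on Pre_build.

-- shared built-in ports (identical source text in both Pythons):
-- zip(*lists): tuples up to the shortest list (zip() of no iterables is empty)
def pyZipStar (ls : List (List String)) : List (List String) :=
  match ls with
  | [] => []
  | l :: rest =>
    let n := rest.foldl (fun m x => min m x.length) l.length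
    (List.range n).map (fun j => ls.map (fun x => x.getD j ""))

-- dict(zip(hits.keys(), vals))  (zip truncates; dict keeps last duplicate — keys are nodup here anyway)
def mkToken (ks : List String) (col : List String) : PySem.Dict String String :=
  PySem.Dict.ofList (ks.zip col)

-- "<w " + ana + " ".join(['{}="{}"'.format(k, token[k]) for k in keys]) + ">" + token["word"] + "</w>"
-- (token[k] lookups are total here via getD ""; Pre_build puts every looked-up key in the dict)
def wStr (keys : List String) (ana : String) (tok : PySem.Dict String String) : String :=
  "<w " ++ ana ++ PySem.Str.join " " (keys.map (fun k => k ++ "=\"" ++ tok.getD k "" ++ "\""))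
    ++ ">" ++ tok.getD "word" "" ++ "</w>"

-- token["lemma"] in {".", "?", "!"}
def isPunct (tok : PySem.Dict String String) : Bool :=
  tok.getD "lemma" "" == "." || tok.getD "lemma" "" == "?" || tok.getD "lemma" "" == "!"

-- ===== PORT A =====
-- A's for-loop with the if/elif/break, column by column
def buildLoop (keys : List String) (ana : String) (rbd rad : Bool) (ks : List String) :
    List (List String) → List String × List String × List String →
    List String × List String × List String
  | [], acc => acc
  | col :: rest, (refs, rt, data) =>
    let tok := mkToken ks col
    let refs' := refs ++ [tok.getD "ref" ""]
    let rt' := rt ++ [tok.getD "in" ""]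
    let data' := data ++ [wStr keys ana tok]
    if isPunct tok then
      if rbd then buildLoop keys ana rbd rad ks rest ([], [], [])
      else if rad then (refs', rt', data')
      else buildLoop keys ana rbd rad ks rest (refs', rt', data')
    else buildLoop keys ana rbd rad ks rest (refs', rt', data')

def build (hits : List (String × List String)) (keys : List String) (ana : String) (remove_before_dot : Bool) (remove_after_dot : Bool) : List String × List String × List String :=
  let d := PySem.Dict.ofList hits
  buildLoop keys ana remove_before_dot remove_after_dot d.keys (pyZipStar d.values) ([], [], [])

-- ===== PORT B =====
def build_alt (hits : List (String × List String)) (keys : List String) (ana : String) (remove_before_dot : Bool) (remove_after_dot : Bool) : List String × List String × List String :=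
  let d := PySem.Dict.ofList hits
  let tokens := (pyZipStar d.values).map (mkToken d.keys)
  let punct := ((PySem.List.enumerate tokens 0).filter (fun p => isPunct p.2)).map (·.1)
  let sel :=
    if remove_before_dot then
      -- tokens[punct[-1] + 1:] if punct else tokens  (index ≥ 0, so .toNat is exact)
      match punct.getLast? with
      | some i => tokens.drop (i + 1).toNat
      | none => tokens
    else if remove_after_dot then
      -- tokens[:punct[0] + 1] if punct else tokens
      match punct.head? with
      | some i => tokens.take (i + 1).toNat
      | none => tokens
    else tokens
  (sel.map (fun t => t.getD "ref" ""), sel.map (fun t => t.getD "in" ""),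
    sel.map (wStr keys ana))

-- ===== PRECONDITION & SPEC =====
-- Pre_build is exactly where the Python A returns: either the token sequence is empty
-- (no row, or some value list empty — zip(*…) yields nothing), or every looked-up key
-- ("ref", "in", "word", "lemma" and each k in keys) is a key of hits (else KeyError).
def Pre_build (hits : List (String × List String)) (keys : List String) (ana : String) (remove_before_dot : Bool) (remove_after_dot : Bool) : Prop :=
  hits = [] ∨ ((PySem.Dict.ofList hits).values.any (fun l => l.isEmpty) = true) ∨
    (∀ k ∈ "ref" :: "in" :: "word" :: "lemma" :: keys, (PySem.Dict.ofList hits).contains k = true)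
instance (hits : List (String × List String)) (keys : List String) (ana : String) (remove_before_dot : Bool) (remove_after_dot : Bool) : Decidable (Pre_build hits keys ana remove_before_dot remove_after_dot) := by unfold Pre_build; infer_instance

def pvWitness_build : (List (String × List String)) × List String × String × Bool × Bool :=
  ([("ref", ["r1", "r2"]), ("in", ["i1", "i2"]), ("word", ["w1", "w2"]),
    ("lemma", ["la", "."]), ("pos", ["p1", "p2"]), ("msd", ["m1", "m2"])],
   ["ref", "lemma", "pos", "msd"], "", false, false)

def Spec_build (hits : List (String × List String)) (keys : List String) (ana : String) (remove_before_dot : Bool) (remove_after_dot : Bool) (out : List String × List String × List String) : Prop := out = build_alt hits keys ana remove_before_dot remove_after_dot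
instance (hits : List (String × List String)) (keys : List String) (ana : String) (remove_before_dot : Bool) (remove_after_dot : Bool) (out : List String × List String × List String) : Decidable (Spec_build hits keys ana remove_before_dot remove_after_dot out) := by unfold Spec_build; infer_instance

-- ===== CLAIM (what is proved, stated in full; the proofs are below) =====
def Claim_equal_build : Prop := ∀ (hits : List (String × List String)) (keys : List String) (ana : String) (remove_before_dot : Bool) (remove_after_dot : Bool), Dom_build hits keys ana remove_before_dot remove_after_dot → Pre_build hits keys ana remove_before_dot remove_after_dot → Spec_build hits keys ana remove_before_dot remove_after_dot (build hits keys ana remove_before_dot remove_after_dot)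

-- ===== LEMMAS AND PROOFS =====

-- the suffix strictly after the last P-element (the whole list if none)
def sfx {α : Type} (P : α → Bool) : List α → List α
  | [] => []
  | t :: ts => if ts.any P then sfx P ts else if P t then ts else t :: ts

-- the prefix up to and including the first P-element (the whole list if none)
def upTo {α : Type} (P : α → Bool) : List α → List α
  | [] => []
  | t :: ts => t :: (if P t then [] else upTo P ts)

def punctIdx {α : Type} (P : α → Bool) (ts : List α) (s : Int) : List Int :=
  ((PySem.List.enumerate ts s).filter (fun p => P p.2)).map (·.1)

theorem punctIdx_def {α : Type} (P : α → Bool) (ts : List α) (s : Int) :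
    ((PySem.List.enumerate ts s).filter (fun p => P p.2)).map (·.1) = punctIdx P ts s := rfl

theorem punctIdx_cons {α : Type} (P : α → Bool) (t : α) (ts : List α) (s : Int) :
    punctIdx P (t :: ts) s = (if P t then [s] else []) ++ punctIdx P ts (s + 1) := by
  simp only [punctIdx, PySem.List.enumerate_cons, List.filter_cons]
  cases h : P t <;> simp [h]

theorem punctIdx_shift {α : Type} (P : α → Bool) (ts : List α) (s : Int) :
    punctIdx P ts s = (punctIdx P ts 0).map (· + s) := by
  induction ts generalizing s with
  | nil => simp [punctIdx]
  | cons t ts ih =>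
    rw [punctIdx_cons, punctIdx_cons, ih (s + 1), ih (0 + 1)]
    simp only [List.map_append, List.map_map]
    congr 1
    · split_ifs <;> simp
    · apply List.map_congr_left; intro x _; simp; omega

theorem punctIdx_nil_iff {α : Type} (P : α → Bool) (ts : List α) (s : Int) :
    punctIdx P ts s = [] ↔ ts.any P = false := by
  induction ts generalizing s with
  | nil => simp [punctIdx]
  | cons t ts ih =>
    rw [punctIdx_cons]
    cases h : P t <;> simp [h, ih]

theorem punctIdx_nonneg {α : Type} (P : α → Bool) (ts : List α) (s : Int)
    (i : Int) (hi : i ∈ punctIdx P ts s) : s ≤ i := by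
  induction ts generalizing s with
  | nil => simp [punctIdx] at hi
  | cons t ts ih =>
    rw [punctIdx_cons] at hi
    rcases List.mem_append.1 hi with h | h
    · split_ifs at h <;> simp_all
    · have := ih (s + 1) h; omega

-- B's drop computes the suffix after the last punctuation
theorem drop_last_punct {α : Type} (P : α → Bool) (ts : List α) :
    (match (punctIdx P ts 0).getLast? with
      | some i => ts.drop (i + 1).toNat
      | none => ts) = if ts.any P then sfx P ts else ts := by
  induction ts with
  | nil => simp [punctIdx]
  | cons t ts ih =>
    rw [punctIdx_cons, punctIdx_shift P ts (0 + 1)]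
    simp only [zero_add]
    by_cases hany : ts.any P = true
    · have hne : punctIdx P ts 0 ≠ [] := by
        intro h; rw [punctIdx_nil_iff] at h; simp [h] at hany
      obtain ⟨j, hj⟩ := Option.ne_none_iff_exists'.1 (mt List.getLast?_eq_none_iff.1 hne)
      have hj0 : 0 ≤ j := punctIdx_nonneg P ts 0 j (List.mem_of_getLast? hj)
      have hmapne : (punctIdx P ts 0).map (fun x => x + 1) ≠ [] := by simpa using hne
      have hlast : ((if P t = true then [0] else []) ++ (punctIdx P ts 0).map (fun x => x + 1)).getLast?
          = some (j + 1) := by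
        rw [List.getLast?_append_of_ne_nil _ hmapne, List.getLast?_map, hj]; rfl
      rw [hlast]
      show (t :: ts).drop (j + 1 + 1).toNat = _
      have hdrop : (j + 1 + 1).toNat = (j + 1).toNat + 1 := by omega
      rw [hdrop, List.drop_succ_cons]
      have ih' : ts.drop (j + 1).toNat = sfx P ts := by
        rw [hj] at ih; simpa [hany] using ih
      rw [ih']
      simp [sfx, hany, List.any_cons]
    · have hnil : punctIdx P ts 0 = [] := (punctIdx_nil_iff P ts 0).2 (by simpa using hany)
      rw [hnil]
      cases h : P t
      · simp [h, sfx, List.any_cons, hany]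
      · simp [h, sfx, List.any_cons, hany]

-- B's take computes the prefix through the first punctuation
theorem take_first_punct {α : Type} (P : α → Bool) (ts : List α) :
    (match (punctIdx P ts 0).head? with
      | some i => ts.take (i + 1).toNat
      | none => ts) = upTo P ts := by
  induction ts with
  | nil => simp [punctIdx, upTo]
  | cons t ts ih =>
    rw [punctIdx_cons, punctIdx_shift P ts (0 + 1)]
    simp only [zero_add]
    cases h : P t
    · simp only [h, Bool.false_eq_true, if_false, List.nil_append]
      cases hp : punctIdx P ts 0 with
      | nil =>
        rw [hp] at ih
        simp only [List.head?_nil] at ih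
        simp only [List.map_nil, List.head?_nil]
        simp [upTo, h, ← ih]
      | cons j js =>
        have hj0 : 0 ≤ j := punctIdx_nonneg P ts 0 j (by simp [hp])
        rw [hp] at ih
        simp only [List.head?_cons] at ih
        simp only [List.map_cons, List.head?_cons]
        show (t :: ts).take (j + 1 + 1).toNat = _
        have hh : (j + 1 + 1).toNat = (j + 1).toNat + 1 := by omega
        rw [hh, List.take_succ_cons, ih]
        simp [upTo, h]
    · simp [h, upTo]

theorem sfx_map {α β : Type} (P : β → Bool) (F : α → β) (ts : List α) :
    sfx P (ts.map F) = (sfx (fun a => P (F a)) ts).map F := by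
  induction ts with
  | nil => simp [sfx]
  | cons t ts ih =>
    by_cases h1 : (ts.any fun a => P (F a)) = true <;>
      by_cases h2 : P (F t) = true <;>
        simp [sfx, List.any_map, Function.comp_def, h1, h2, ih]

theorem upTo_map {α β : Type} (P : β → Bool) (F : α → β) (ts : List α) :
    upTo P (ts.map F) = (upTo (fun a => P (F a)) ts).map F := by
  induction ts with
  | nil => simp [upTo]
  | cons t ts ih =>
    simp only [List.map_cons, upTo]
    split_ifs with h
    · simp
    · simp [ih]

-- A's loop with neither flag: plain map
theorem buildLoop_plain (keys : List String) (ana : String) (ks : List String)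
    (cols : List (List String)) (r q d : List String) :
    buildLoop keys ana false false ks cols (r, q, d) =
      (r ++ cols.map (fun c => (mkToken ks c).getD "ref" ""),
       q ++ cols.map (fun c => (mkToken ks c).getD "in" ""),
       d ++ cols.map (fun c => wStr keys ana (mkToken ks c))) := by
  induction cols generalizing r q d with
  | nil => simp [buildLoop]
  | cons c cols ih =>
    by_cases h : isPunct (mkToken ks c) = true <;> simp [buildLoop, h, ih]

-- A's loop with remove_after_dot: map over the prefix through the first punctuation
theorem buildLoop_rad (keys : List String) (ana : String) (ks : List String)
    (cols : List (List String)) (r q d : List String) :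
    buildLoop keys ana false true ks cols (r, q, d) =
      (r ++ (upTo (fun c => isPunct (mkToken ks c)) cols).map (fun c => (mkToken ks c).getD "ref" ""),
       q ++ (upTo (fun c => isPunct (mkToken ks c)) cols).map (fun c => (mkToken ks c).getD "in" ""),
       d ++ (upTo (fun c => isPunct (mkToken ks c)) cols).map (fun c => wStr keys ana (mkToken ks c))) := by
  induction cols generalizing r q d with
  | nil => simp [buildLoop, upTo]
  | cons c cols ih =>
    by_cases h : isPunct (mkToken ks c) = true <;> simp [buildLoop, upTo, h, ih]

-- A's loop with remove_before_dot: map over the suffix after the last punctuation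
theorem buildLoop_rbd (keys : List String) (ana : String) (rad : Bool) (ks : List String)
    (cols : List (List String)) (r q d : List String) :
    buildLoop keys ana true rad ks cols (r, q, d) =
      (if cols.any (fun c => isPunct (mkToken ks c)) then
        ((sfx (fun c => isPunct (mkToken ks c)) cols).map (fun c => (mkToken ks c).getD "ref" ""),
         (sfx (fun c => isPunct (mkToken ks c)) cols).map (fun c => (mkToken ks c).getD "in" ""),
         (sfx (fun c => isPunct (mkToken ks c)) cols).map (fun c => wStr keys ana (mkToken ks c)))
      else
        (r ++ cols.map (fun c => (mkToken ks c).getD "ref" ""),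
         q ++ cols.map (fun c => (mkToken ks c).getD "in" ""),
         d ++ cols.map (fun c => wStr keys ana (mkToken ks c)))) := by
  induction cols generalizing r q d with
  | nil => simp [buildLoop]
  | cons c cols ih =>
    by_cases h : isPunct (mkToken ks c) = true <;>
      by_cases hany : cols.any (fun c => isPunct (mkToken ks c)) = true <;>
        simp [buildLoop, sfx, h, hany, ih]

-- ===== VERDICT (by name: the statement is the Claim_ definition above) =====
theorem build_spec : Claim_equal_build := by
  intro hits keys ana rbd rad _ _
  unfold Spec_build
  simp only [build, build_alt, punctIdx_def]
  cases rbd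
  · cases rad
    · simp only [Bool.false_eq_true, if_false]
      rw [buildLoop_plain]
      simp [List.map_map, Function.comp_def]
    · simp only [Bool.false_eq_true, if_false]
      rw [buildLoop_rad, take_first_punct, upTo_map]
      simp [List.map_map, Function.comp_def]
  · simp only [if_pos]
    rw [buildLoop_rbd, drop_last_punct]
    by_cases hany : (pyZipStar (PySem.Dict.ofList hits).values).any
        (fun c => isPunct (mkToken (PySem.Dict.ofList hits).keys c)) = true <;>
      simp [List.any_map, Function.comp_def, hany, sfx_map, List.map_map]
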